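-- pv_equiv track=rewrite | github.com/dpp291187/quantumSbox2026 | quantumSbox.py | estimate_resources_clean_ancilla
-- ===== SOURCE A (Python) =====
-- def popcount(x):
--     """Return the Hamming weight of an integer."""
--     return x.bit_count() if hasattr(int, "bit_count") else bin(x).count("1")
--
-- def estimate_resources_clean_ancilla(n, m, anf_masks, work):
--     """
--     Estimate logical resources for the clean-ancilla compute-toggle-uncompute implementation.
--
--     Mapping:
--       degree 0   -> X
--       degree 1   -> CNOT
--       degree 2   -> Toffoli
--       degree >=3 -> chain + toggle + uncompute
--
--     For one monomial of degree d >= 3: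
--       required clean ancilla = d - 2
--       Toffoli count          = 2d - 3
--     """
--     x_count = 0
--     cnot_count = 0
--     toffoli_count = 0
--     total_ops = 0
--
--     for masks in anf_masks:
--         for mask in masks:
--             d = popcount(mask)
--
--             if d == 0:
--                 x_count += 1
--                 total_ops += 1
--             elif d == 1:
--                 cnot_count += 1
--                 total_ops += 1
--             elif d == 2:
--                 toffoli_count += 1
--                 total_ops += 1
--             else:
--                 need = d - 2
--                 if work < need:
--                     raise ValueError(f"Need >= {need} clean ancilla, but work={work}.")
--                 add_toffoli = 2 * d - 3
--                 toffoli_count += add_toffoli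
--                 total_ops += add_toffoli
--
--     return {
--         "width": n + m + work,
--         "ancilla": work,
--         "x": x_count,
--         "cnot": cnot_count,
--         "toffoli": toffoli_count,
--         "total_ops": total_ops,
--         "depth_seq": total_ops,
--     }
-- ===== SOURCE B (Python) =====
-- def popcount(x):
--     """Return the Hamming weight of an integer."""
--     return x.bit_count() if hasattr(int, "bit_count") else bin(x).count("1")
--
-- def estimate_resources_clean_ancilla(n, m, anf_masks, work):
--     # Flatten to a list of monomial degrees (same nested order as A's loop).
--     degs = [popcount(mask) for masks in anf_masks for mask in masks]
--     # Validation scan in the original order, reproducing A's error on the first bad mask.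
--     for d in degs:
--         if d >= 3 and work < d - 2:
--             raise ValueError(f"Need >= {d - 2} clean ancilla, but work={work}.")
--     # Per-category tallies instead of one accumulator loop.
--     x_count = degs.count(0)
--     cnot_count = degs.count(1)
--     toffoli_count = degs.count(2) + sum(2 * d - 3 for d in degs if d >= 3)
--     total_ops = x_count + cnot_count + toffoli_count
--     return {
--         "width": n + m + work,
--         "ancilla": work,
--         "x": x_count,
--         "cnot": cnot_count,
--         "toffoli": toffoli_count,
--         "total_ops": total_ops,
--         "depth_seq": total_ops,
--     }
-- ===== Notes on version B (the rewrite author's own statement) =====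
-- stated objective: simpler
-- what changed: replaces A's single nested loop threading four running accumulators with a flattened degree list followed by a validation scan and per-category count/sum tallies
import Mathlib
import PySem

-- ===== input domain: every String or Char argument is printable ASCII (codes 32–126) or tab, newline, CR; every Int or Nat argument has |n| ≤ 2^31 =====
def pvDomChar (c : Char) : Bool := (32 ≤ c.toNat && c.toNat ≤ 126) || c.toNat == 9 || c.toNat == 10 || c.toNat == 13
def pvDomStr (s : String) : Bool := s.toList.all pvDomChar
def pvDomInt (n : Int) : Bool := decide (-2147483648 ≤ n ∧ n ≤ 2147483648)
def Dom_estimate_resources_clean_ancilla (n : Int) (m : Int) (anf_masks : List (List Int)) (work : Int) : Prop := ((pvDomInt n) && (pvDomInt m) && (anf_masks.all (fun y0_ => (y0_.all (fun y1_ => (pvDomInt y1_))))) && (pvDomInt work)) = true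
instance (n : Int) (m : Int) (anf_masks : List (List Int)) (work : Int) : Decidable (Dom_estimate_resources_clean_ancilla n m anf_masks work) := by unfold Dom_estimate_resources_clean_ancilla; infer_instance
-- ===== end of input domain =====

-- B replaces A's nested accumulator loop with a flattened degree list, a validation scan and
-- per-category count/sum tallies (objective: simpler). Same value wherever A returns (Pre_).

-- shared module-level helper: popcount(x) = x.bit_count() (Python-exact on negatives)
def popcount (x : Int) : Int := (PySem.Int.bitCount x : Int)

-- ===== PORT A =====
-- one iteration of A's inner loop body; `none` models the raised ValueError
def pvStepA (work : Int) (st : Option (Int × Int × Int × Int)) (mask : Int) :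
    Option (Int × Int × Int × Int) :=
  match st with
  | none => none
  | some (x, c, t, tot) =>
    let d := popcount mask
    if d = 0 then some (x + 1, c, t, tot + 1)
    else if d = 1 then some (x, c + 1, t, tot + 1)
    else if d = 2 then some (x, c, t + 1, tot + 1)
    else
      let need := d - 2
      if work < need then none
      else
        let add_toffoli := 2 * d - 3
        some (x, c, t + add_toffoli, tot + add_toffoli)

def estimate_resources_clean_ancilla (n : Int) (m : Int) (anf_masks : List (List Int)) (work : Int) : List (String × Int) :=
  let st := anf_masks.foldl (fun acc masks => masks.foldl (pvStepA work) acc)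
              (some (0, 0, 0, 0))
  match st with
  | none => []   -- A raises here; excluded by Pre_
  | some (x_count, cnot_count, toffoli_count, total_ops) =>
    [("width", n + m + work), ("ancilla", work), ("x", x_count), ("cnot", cnot_count),
     ("toffoli", toffoli_count), ("total_ops", total_ops), ("depth_seq", total_ops)]

-- ===== PORT B =====
def estimate_resources_clean_ancilla_alt (n : Int) (m : Int) (anf_masks : List (List Int)) (work : Int) : List (String × Int) :=
  let degs := anf_masks.flatMap (fun masks => masks.map popcount)
  if degs.any (fun d => decide (3 ≤ d) && decide (work < d - 2)) then []  -- B raises here; excluded by Pre_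
  else
    let x_count := (PySem.List.count degs 0 : Int)
    let cnot_count := (PySem.List.count degs 1 : Int)
    let toffoli_count := (PySem.List.count degs 2 : Int)
        + ((degs.filter (fun d => decide (3 ≤ d))).map (fun d => 2 * d - 3)).sum
    let total_ops := x_count + cnot_count + toffoli_count
    [("width", n + m + work), ("ancilla", work), ("x", x_count), ("cnot", cnot_count),
     ("toffoli", toffoli_count), ("total_ops", total_ops), ("depth_seq", total_ops)]

-- ===== PRECONDITION & SPEC =====
-- Pre_ excludes exactly the inputs where A raises ValueError (some mask of degree d ≥ 3 with work < d - 2).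
def Pre_estimate_resources_clean_ancilla (n : Int) (m : Int) (anf_masks : List (List Int)) (work : Int) : Prop :=
  ∀ masks ∈ anf_masks, ∀ mask ∈ masks, popcount mask ≤ 2 ∨ popcount mask - 2 ≤ work
instance (n : Int) (m : Int) (anf_masks : List (List Int)) (work : Int) : Decidable (Pre_estimate_resources_clean_ancilla n m anf_masks work) := by unfold Pre_estimate_resources_clean_ancilla; infer_instance

def pvWitness_estimate_resources_clean_ancilla : Int × Int × List (List Int) × Int := (2, 1, [[3, 0], [7]], 1)

def Spec_estimate_resources_clean_ancilla (n : Int) (m : Int) (anf_masks : List (List Int)) (work : Int) (out : List (String × Int)) : Prop := out = estimate_resources_clean_ancilla_alt n m anf_masks work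
instance (n : Int) (m : Int) (anf_masks : List (List Int)) (work : Int) (out : List (String × Int)) : Decidable (Spec_estimate_resources_clean_ancilla n m anf_masks work out) := by unfold Spec_estimate_resources_clean_ancilla; infer_instance

-- ===== CLAIM (what is proved, stated in full; the proofs are below) =====
def Claim_equal_estimate_resources_clean_ancilla : Prop := ∀ (n : Int) (m : Int) (anf_masks : List (List Int)) (work : Int), Dom_estimate_resources_clean_ancilla n m anf_masks work → Pre_estimate_resources_clean_ancilla n m anf_masks work → Spec_estimate_resources_clean_ancilla n m anf_masks work (estimate_resources_clean_ancilla n m anf_masks work)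

-- ===== LEMMAS AND PROOFS =====

-- A's step depends on the mask only through its degree
def pvStepD (work : Int) (st : Option (Int × Int × Int × Int)) (d : Int) :
    Option (Int × Int × Int × Int) :=
  match st with
  | none => none
  | some (x, c, t, tot) =>
    if d = 0 then some (x + 1, c, t, tot + 1)
    else if d = 1 then some (x, c + 1, t, tot + 1)
    else if d = 2 then some (x, c, t + 1, tot + 1)
    else if work < d - 2 then none
    else some (x, c, t + (2 * d - 3), tot + (2 * d - 3))

lemma stepA_eq_stepD (work : Int) (st : Option (Int × Int × Int × Int)) (mask : Int) :
    pvStepA work st mask = pvStepD work st (popcount mask) := by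
  cases st with
  | none => rfl
  | some s => obtain ⟨x, c, t, tot⟩ := s; rfl

-- B's tallies of a degree list
def pvTally (work : Int) (ds : List Int) : Int × Int × Int :=
  ((PySem.List.count ds 0 : Int), (PySem.List.count ds 1 : Int),
   (PySem.List.count ds 2 : Int) + ((ds.filter (fun d => decide (3 ≤ d))).map (fun d => 2 * d - 3)).sum)

lemma foldD_eq (work : Int) (ds : List Int)
    (hnn : ∀ d ∈ ds, 0 ≤ d) (h : ∀ d ∈ ds, d ≤ 2 ∨ d - 2 ≤ work) (x c t tot : Int) :
    ds.foldl (pvStepD work) (some (x, c, t, tot)) =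
      some (x + (pvTally work ds).1, c + (pvTally work ds).2.1, t + (pvTally work ds).2.2,
            tot + (pvTally work ds).1 + (pvTally work ds).2.1 + (pvTally work ds).2.2) := by
  induction ds generalizing x c t tot with
  | nil => simp [pvTally, PySem.List.count]
  | cons d ds ih =>
    have hd := h d (by simp)
    have hdn := hnn d (by simp)
    have htl : ∀ e ∈ ds, e ≤ 2 ∨ e - 2 ≤ work := fun e he => h e (by simp [he])
    have hnntl : ∀ e ∈ ds, 0 ≤ e := fun e he => hnn e (by simp [he])
    simp only [List.foldl_cons, pvStepD]
    by_cases h0 : d = 0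
    · subst h0
      rw [if_pos rfl, ih hnntl htl]
      simp [pvTally, PySem.List.count_eq]
      ring_nf
      exact ⟨trivial, trivial⟩
    · by_cases h1 : d = 1
      · subst h1
        rw [if_neg (by decide), if_pos rfl, ih hnntl htl]
        simp [pvTally, PySem.List.count_eq]
        ring_nf
        exact ⟨trivial, trivial⟩
      · by_cases h2 : d = 2
        · subst h2
          rw [if_neg (by decide), if_neg (by decide), if_pos rfl, ih hnntl htl]
          simp [pvTally, PySem.List.count_eq]
          ring_nf
          exact ⟨trivial, trivial⟩
        · have h3 : 3 ≤ d := by omega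
          have hwork : ¬ work < d - 2 := by omega
          rw [if_neg h0, if_neg h1, if_neg h2, if_neg hwork, ih hnntl htl]
          have hfil : (d :: ds).filter (fun e => decide (3 ≤ e)) =
              d :: ds.filter (fun e => decide (3 ≤ e)) := by
            simp [h3]
          simp [pvTally, PySem.List.count_eq, h0, h1, h2, hfil]
          ring_nf
          try exact ⟨trivial, trivial⟩

-- nested foldl = foldl over the flattened list
lemma foldl_nested (work : Int) (ams : List (List Int)) (st : Option (Int × Int × Int × Int)) :
    ams.foldl (fun acc masks => masks.foldl (pvStepA work) acc) st =
      (ams.flatMap (fun masks => masks.map popcount)).foldl (pvStepD work) st := by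
  induction ams generalizing st with
  | nil => rfl
  | cons ms ams ih =>
    simp only [List.flatMap_cons, List.foldl_append, List.foldl_cons, ih]
    congr 1
    have hfun : pvStepA work = fun st mask => pvStepD work st (popcount mask) :=
      funext fun st => funext fun mask => stepA_eq_stepD work st mask
    rw [hfun, List.foldl_map]

-- ===== VERDICT (by name: the statement is the Claim_ definition above) =====
theorem estimate_resources_clean_ancilla_spec : Claim_equal_estimate_resources_clean_ancilla := by
  intro n m anf_masks work _ hpre
  unfold Spec_estimate_resources_clean_ancilla
  unfold estimate_resources_clean_ancilla estimate_resources_clean_ancilla_alt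
  have hmem : ∀ d ∈ anf_masks.flatMap (fun masks => masks.map popcount),
      0 ≤ d ∧ (d ≤ 2 ∨ d - 2 ≤ work) := by
    intro d hd
    simp only [List.mem_flatMap, List.mem_map] at hd
    obtain ⟨ms, hms, mask, hmask, rfl⟩ := hd
    exact ⟨by unfold popcount; exact Int.natCast_nonneg _, hpre ms hms mask hmask⟩
  have hany : (anf_masks.flatMap (fun masks => masks.map popcount)).any
      (fun d => decide (3 ≤ d) && decide (work < d - 2)) = false := by
    rw [List.any_eq_false]
    intro d hd
    have := hmem d hd
    simp only [Bool.and_eq_true, decide_eq_true_eq, not_and]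
    omega
  rw [foldl_nested, foldD_eq work _ (fun d hd => (hmem d hd).1) (fun d hd => (hmem d hd).2)]
  simp [hany, pvTally]
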